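-- pv_equiv track=rewrite | github.com/vanshjjw/qec-bivariate-bicycle | src/experimentation/factorization.py | custom_contains
-- ===== SOURCE A (Python) =====
-- import math
--
-- def find_min_order(value: (int, int), l: int, m: int) -> int:
--     if value[0] == 0:
--         return int(math.ceil(m / math.gcd(value[1], m)))
--     if value[1] == 0:
--         return int(math.ceil(l / math.gcd(value[0], l)))
--     return int(math.ceil(l / math.gcd(value[0], l)))
--
-- def custom_contains(generators: list[(int, int)], value: (int, int), l, m) -> bool:
--     if len(generators) == 0:
--         return False
--     if value == (0, 0):
--         return True
--
--     value_order = find_min_order(value, l, m)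
--
--     for generator in generators:
--         for power in range(1, value_order):
--             if (value[0] * power) % l == generator[0] and (value[1] * power) % m == generator[1]:
--                 return True
--
--         generator_order = find_min_order(generator, l, m)
--         for power in range(1, generator_order):
--             if (generator[0] * power) % l == value[0] and (generator[1] * power) % m == value[1]:
--                 return True
--
--     return False
-- ===== SOURCE B (Python) =====
-- import math
--
-- def _min_order(v, l, m):
--     # gcd divides the numerator exactly, so plain floor division equals A's ceil
--     if v[0] == 0:
--         return m // math.gcd(v[1], m)
--     return l // math.gcd(v[0], l)
--
-- def _cong(a, b, n):
--     """Solution set of a*p ≡ b (mod n), n != 0, as (r, M) meaning {p : p ≡ r (mod M)}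
--     with 0 <= r < M; None if unsolvable."""
--     n = abs(n)
--     g = math.gcd(a, n)
--     if b % g != 0:
--         return None
--     M = n // g
--     r = (b // g) * pow(a // g, -1, M) % M
--     return (r, M)
--
-- def _merge(c1, c2):
--     """Intersection of two congruence classes (general CRT), same representation."""
--     if c1 is None or c2 is None:
--         return None
--     r1, M1 = c1
--     r2, M2 = c2
--     c = _cong(M1, r2 - r1, M2)
--     if c is None:
--         return None
--     k, _ = c
--     L = M1 * (M2 // math.gcd(M1, M2))
--     return ((r1 + M1 * k) % L, L)
--
-- def _reaches(x, t, l, m, N):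
--     """exists p in range(1, N) with (x0*p) % l == t0 and (x1*p) % m == t1,
--     decided in closed form by solving the two linear congruences."""
--     if t[0] % l != t[0] or t[1] % m != t[1]:
--         return False
--     c = _merge(_cong(x[0], t[0], l), _cong(x[1], t[1], m))
--     if c is None:
--         return False
--     r, L = c
--     p = r if r > 0 else L   # smallest admissible power
--     return p < N
--
-- def custom_contains(generators, value, l, m):
--     if not generators:
--         return False
--     if value == (0, 0):
--         return True
--     N = _min_order(value, l, m)
--     return any(
--         _reaches(value, g, l, m, N) or _reaches(g, value, l, m, _min_order(g, l, m))
--         for g in generators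
--     )
-- ===== Notes on version B (the rewrite author's own statement) =====
-- stated objective: faster
-- what changed: B replaces both power-scanning loops entirely: for each generator it decides 'some power p in [1,order) hits' in closed form by solving the two linear congruences x0*p=t0 (mod l), x1*p=t1 (mod m) with extended-gcd modular inverses and a general CRT merge, then comparing the smallest positive solution against the order bound.
-- outside the precondition, e.g. on custom_contains([(1, 1)], (1, 1), 0, 5): A returns False, B raises ZeroDivisionError
import Mathlib
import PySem

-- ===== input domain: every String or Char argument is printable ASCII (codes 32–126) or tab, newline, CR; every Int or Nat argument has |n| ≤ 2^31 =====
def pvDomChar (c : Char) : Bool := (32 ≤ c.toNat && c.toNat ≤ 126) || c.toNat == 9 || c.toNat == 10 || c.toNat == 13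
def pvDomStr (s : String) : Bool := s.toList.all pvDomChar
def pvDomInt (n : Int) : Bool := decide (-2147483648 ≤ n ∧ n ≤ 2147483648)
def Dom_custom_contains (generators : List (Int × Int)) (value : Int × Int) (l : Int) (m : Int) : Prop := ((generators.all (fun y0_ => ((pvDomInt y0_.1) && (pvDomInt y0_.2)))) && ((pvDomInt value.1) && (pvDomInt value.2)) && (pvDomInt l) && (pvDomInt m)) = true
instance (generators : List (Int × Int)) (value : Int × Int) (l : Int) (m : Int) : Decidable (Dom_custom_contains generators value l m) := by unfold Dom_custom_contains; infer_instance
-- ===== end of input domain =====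

-- B drops both power-scanning loops and decides each hit in closed form by solving the two linear
-- congruences with extended-gcd inverses and a general CRT merge (objective: faster).

-- ===== PORT A =====
-- int(math.ceil(a / g)) with g = gcd dividing a exactly (|a| ≤ 2^31 < 2^53, float division exact there):
-- equals the ceiling division -((-a) // g), ported exactly as such.
def pvCeilDiv (a g : Int) : Int := -(PySem.Int.floordiv (-a) g)

def find_min_order (value : Int × Int) (l : Int) (m : Int) : Int :=
  if value.1 = 0 then pvCeilDiv m ((Int.gcd value.2 m : Nat) : Int)
  else if value.2 = 0 then pvCeilDiv l ((Int.gcd value.1 l : Nat) : Int)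
  else pvCeilDiv l ((Int.gcd value.1 l : Nat) : Int)

def custom_contains (generators : List (Int × Int)) (value : Int × Int) (l : Int) (m : Int) : Bool :=
  if generators.length = 0 then false
  else if value = (0, 0) then true
  else
    let value_order := find_min_order value l m
    generators.any (fun g =>
      (PySem.List.pyRange 1 value_order 1).any (fun p =>
        PySem.Int.mod (value.1 * p) l == g.1 && PySem.Int.mod (value.2 * p) m == g.2)
      ||
      (PySem.List.pyRange 1 (find_min_order g l m) 1).any (fun p =>
        PySem.Int.mod (g.1 * p) l == value.1 && PySem.Int.mod (g.2 * p) m == value.2))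

-- ===== PORT B =====
-- _min_order: gcd divides the numerator exactly, so Source B uses plain floor division
def pvOrderB (v : Int × Int) (l : Int) (m : Int) : Int :=
  if v.1 = 0 then PySem.Int.floordiv m ((Int.gcd v.2 m : Nat) : Int)
  else PySem.Int.floordiv l ((Int.gcd v.1 l : Nat) : Int)

-- port of pow(a, -1, M) (called with M ≥ 1, gcd(a, M) = 1): exact, because gcdA a M % M is, like
-- Python's pow(a, -1, M), THE unique inverse of a modulo M lying in [0, M)
def pvInvMod (a M : Int) : Int := PySem.Int.mod (Int.gcdA a M) M

-- _cong(a, b, n): solutions of a*p ≡ b (mod n) as some (r, M) = {p : p ≡ r (mod M)}, 0 ≤ r < M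
def pvCong (a b n : Int) : Option (Int × Int) :=
  let n' := |n|
  let g : Int := ((Int.gcd a n' : Nat) : Int)
  if PySem.Int.mod b g ≠ 0 then none
  else
    let M := PySem.Int.floordiv n' g
    some (PySem.Int.mod (PySem.Int.floordiv b g * pvInvMod (PySem.Int.floordiv a g) M) M, M)

-- _merge: intersection of two congruence classes (general CRT)
def pvMerge (c1 c2 : Option (Int × Int)) : Option (Int × Int) :=
  match c1, c2 with
  | some (r1, M1), some (r2, M2) =>
    match pvCong M1 (r2 - r1) M2 with
    | none => none
    | some (k, _) =>
      let L := M1 * PySem.Int.floordiv M2 ((Int.gcd M1 M2 : Nat) : Int)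
      some (PySem.Int.mod (r1 + M1 * k) L, L)
  | _, _ => none

-- _reaches: exists p in range(1, N) with (x0*p) % l == t0 and (x1*p) % m == t1, in closed form
def pvReaches (x t : Int × Int) (l m N : Int) : Bool :=
  if PySem.Int.mod t.1 l ≠ t.1 ∨ PySem.Int.mod t.2 m ≠ t.2 then false
  else
    match pvMerge (pvCong x.1 t.1 l) (pvCong x.2 t.2 m) with
    | none => false
    | some (r, L) => decide ((if 0 < r then r else L) < N)

def custom_contains_alt (generators : List (Int × Int)) (value : Int × Int) (l : Int) (m : Int) : Bool :=
  if generators.isEmpty then false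
  else if value = (0, 0) then true
  else
    let N := pvOrderB value l m
    generators.any (fun g =>
      pvReaches value g l m N || pvReaches g value l m (pvOrderB g l m))

-- ===== PRECONDITION & SPEC =====
-- Pre_ excludes l = 0 or m = 0 (with nonempty generators and value ≠ (0,0)): there A's '% l' / '% m'
-- generally raises ZeroDivisionError as soon as a power loop runs (on the few such inputs where every
-- loop is empty A returns False, and B's canonical-residue test '% l' raises).
def Pre_custom_contains (generators : List (Int × Int)) (value : Int × Int) (l : Int) (m : Int) : Prop :=
  generators = [] ∨ value = (0, 0) ∨ (l ≠ 0 ∧ m ≠ 0)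
instance (generators : List (Int × Int)) (value : Int × Int) (l : Int) (m : Int) : Decidable (Pre_custom_contains generators value l m) := by unfold Pre_custom_contains; infer_instance

def pvWitness_custom_contains : (List (Int × Int)) × (Int × Int) × Int × Int := ([(1, 1), (2, 0)], (1, 2), 6, 4)

def Spec_custom_contains (generators : List (Int × Int)) (value : Int × Int) (l : Int) (m : Int) (out : Bool) : Prop := out = custom_contains_alt generators value l m
instance (generators : List (Int × Int)) (value : Int × Int) (l : Int) (m : Int) (out : Bool) : Decidable (Spec_custom_contains generators value l m out) := by unfold Spec_custom_contains; infer_instance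

-- ===== CLAIM (what is proved, stated in full; the proofs are below) =====
def Claim_equal_custom_contains : Prop := ∀ (generators : List (Int × Int)) (value : Int × Int) (l : Int) (m : Int), Dom_custom_contains generators value l m → Pre_custom_contains generators value l m → Spec_custom_contains generators value l m (custom_contains generators value l m)

-- ===== LEMMAS AND PROOFS =====

-- canonical range of Python's % (sign of the divisor)
def pvCanon (t n : Int) : Prop := (0 < n ∧ 0 ≤ t ∧ t < n) ∨ (n < 0 ∧ n < t ∧ t ≤ 0)

lemma pv_mod_canon (a n : Int) (hn : n ≠ 0) : pvCanon (PySem.Int.mod a n) n := by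
  rcases lt_or_gt_of_ne hn with h | h
  · exact Or.inr ⟨h, (PySem.Int.mod_neg_bounds a h).1, (PySem.Int.mod_neg_bounds a h).2⟩
  · exact Or.inl ⟨h, PySem.Int.mod_nonneg a h, PySem.Int.mod_lt a h⟩

lemma pv_mod_dvd (a n : Int) : n ∣ (a - PySem.Int.mod a n) := by
  have h := PySem.Int.floordiv_mul_add_mod a n
  exact ⟨PySem.Int.floordiv a n, by linarith⟩

lemma pv_mod_unique (a t n : Int) (hn : n ≠ 0) (hd : n ∣ (a - t)) (hc : pvCanon t n) :
    PySem.Int.mod a n = t := by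
  have hd2 := pv_mod_dvd a n
  have hdvd : n ∣ (PySem.Int.mod a n - t) := by
    have h3 := dvd_sub hd hd2
    have he : (a - t) - (a - PySem.Int.mod a n) = PySem.Int.mod a n - t := by ring
    rwa [he] at h3
  have hc2 := pv_mod_canon a n hn
  have h0 : PySem.Int.mod a n - t = 0 := by
    refine Int.eq_zero_of_abs_lt_dvd ((abs_dvd n _).mpr hdvd) ?_
    unfold pvCanon at hc hc2
    rcases abs_cases n with ⟨he, hs⟩ | ⟨he, hs⟩ <;>
      rcases abs_cases (PySem.Int.mod a n - t) with ⟨he2, hs2⟩ | ⟨he2, hs2⟩ <;> omega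
  omega

-- Python mod equality as a congruence: mod a n = t ↔ t canonical and a ≡ t (mod n)
lemma pv_mod_char (a t n : Int) (hn : n ≠ 0) :
    PySem.Int.mod a n = t ↔ (PySem.Int.mod t n = t ∧ n ∣ (a - t)) := by
  constructor
  · rintro rfl
    refine ⟨pv_mod_unique _ _ _ hn ⟨0, by ring⟩ (pv_mod_canon a n hn), pv_mod_dvd a n⟩
  · rintro ⟨hc, hd⟩
    exact pv_mod_unique a t n hn hd (hc ▸ pv_mod_canon t n hn)

-- the value computed by pvInvMod is an inverse
lemma pv_invMod_spec (a M : Int) (hM : 0 < M) (h : Int.gcd a M = 1) :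
    M ∣ (a * pvInvMod a M - 1) := by
  have hb := Int.gcd_eq_gcd_ab a M
  rw [h] at hb
  have h1 : M ∣ (a * Int.gcdA a M - 1) := ⟨-(Int.gcdB a M), by push_cast at hb; linarith⟩
  have h2 : M ∣ (Int.gcdA a M - pvInvMod a M) := pv_mod_dvd _ M
  have he : a * pvInvMod a M - 1
      = (a * Int.gcdA a M - 1) - a * (Int.gcdA a M - pvInvMod a M) := by ring
  rw [he]
  exact dvd_sub h1 (h2.mul_left a)

-- floordiv is exact division under divisibility (positive divisor)
lemma pv_floordiv_exact (a g : Int) (hg : 0 < g) (h : g ∣ a) :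
    g * PySem.Int.floordiv a g = a := by
  rw [PySem.Int.floordiv_eq_ediv_of_pos hg]
  exact Int.mul_ediv_cancel' h

lemma pv_gcd_cast_pos (a b : Int) (hb : b ≠ 0) : 0 < ((Int.gcd a b : Nat) : Int) := by
  have : Int.gcd a b ≠ 0 := by
    intro h0
    exact hb (Int.gcd_eq_zero_iff.mp h0).2
  exact_mod_cast Nat.pos_of_ne_zero this

-- pvCong characterization: none ⇒ no solution
lemma pv_cong_none (a b n : Int) (hn : n ≠ 0) (h : pvCong a b n = none) :
    ∀ p : Int, ¬ (n ∣ (a * p - b)) := by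
  intro p hp
  unfold pvCong at h
  by_cases hb : PySem.Int.mod b ((Int.gcd a |n| : Nat) : Int) ≠ 0
  · apply hb
    rw [PySem.Int.mod_eq_zero_iff_dvd]
    have hga : ((Int.gcd a |n| : Nat) : Int) ∣ a := Int.gcd_dvd_left a |n|
    have hgn : ((Int.gcd a |n| : Nat) : Int) ∣ |n| := Int.gcd_dvd_right a |n|
    have h1 : ((Int.gcd a |n| : Nat) : Int) ∣ (a * p - b) := hgn.trans ((abs_dvd n _).mpr hp)
    have h2 := dvd_sub (hga.mul_right p) h1
    have he : a * p - (a * p - b) = b := by ring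
    rwa [he] at h2
  · rw [if_neg hb] at h
    simp at h

-- pvCong characterization: some (r, M) ⇒ solution set is exactly {p : p ≡ r (mod M)}
lemma pv_cong_some (a b n r M : Int) (hn : n ≠ 0) (h : pvCong a b n = some (r, M)) :
    (0 < M ∧ 0 ≤ r ∧ r < M) ∧ ∀ p : Int, (n ∣ (a * p - b) ↔ M ∣ (p - r)) := by
  unfold pvCong at h
  have hn'pos : 0 < |n| := abs_pos.mpr hn
  have hgpos : 0 < ((Int.gcd a |n| : Nat) : Int) := pv_gcd_cast_pos a |n| (by omega)
  by_cases hb : PySem.Int.mod b ((Int.gcd a |n| : Nat) : Int) ≠ 0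
  · rw [if_pos hb] at h
    simp at h
  · rw [if_neg hb] at h
    push_neg at hb
    simp only [Option.some.injEq, Prod.mk.injEq] at h
    obtain ⟨hr, hM⟩ := h
    set g : Int := ((Int.gcd a |n| : Nat) : Int) with hgdef
    have hgb : g ∣ b := (PySem.Int.mod_eq_zero_iff_dvd b g).mp hb
    have hga : g ∣ a := by rw [hgdef]; exact Int.gcd_dvd_left a |n|
    have hgn : g ∣ |n| := by rw [hgdef]; exact Int.gcd_dvd_right a |n|
    have hMn : g * PySem.Int.floordiv |n| g = |n| := pv_floordiv_exact _ _ hgpos hgn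
    have haa : g * PySem.Int.floordiv a g = a := pv_floordiv_exact _ _ hgpos hga
    have hbb : g * PySem.Int.floordiv b g = b := pv_floordiv_exact _ _ hgpos hgb
    subst hM
    set M := PySem.Int.floordiv |n| g with hMdef
    set a' := PySem.Int.floordiv a g with ha'def
    set b' := PySem.Int.floordiv b g with hb'def
    have hMpos : 0 < M := by nlinarith
    have hcop : Int.gcd a' M = 1 := by
      have hgcdpos : 0 < Int.gcd a |n| := by
        rw [hgdef] at hgpos
        exact_mod_cast hgpos
      have h1 : a' = a / g := by
        rw [ha'def, PySem.Int.floordiv_eq_ediv_of_pos hgpos]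
      have h2 : M = |n| / g := by
        rw [hMdef, PySem.Int.floordiv_eq_ediv_of_pos hgpos]
      have h3 := Int.gcd_div_gcd_div_gcd (i := a) (j := |n|) hgcdpos
      rw [h1, h2]
      exact h3
    set inv := pvInvMod a' M with hinvdef
    have hinv : M ∣ (a' * inv - 1) := pv_invMod_spec a' M hMpos hcop
    have hrb : M ∣ (b' * inv - r) := by
      rw [← hr]
      exact pv_mod_dvd _ M
    refine ⟨⟨hMpos, by rw [← hr]; exact PySem.Int.mod_nonneg _ hMpos,
              by rw [← hr]; exact PySem.Int.mod_lt _ hMpos⟩, fun p => ?_⟩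
    have step1 : n ∣ (a * p - b) ↔ M ∣ (a' * p - b') := by
      rw [← abs_dvd, ← hMn, ← haa, ← hbb]
      have he : g * a' * p - g * b' = g * (a' * p - b') := by ring
      rw [he]
      exact mul_dvd_mul_iff_left (ne_of_gt hgpos)
    rw [step1]
    constructor
    · intro hM1
      have he : p - r = p * (1 - a' * inv) + inv * (a' * p - b') + (b' * inv - r) := by ring
      rw [he]
      have h1 : M ∣ (1 - a' * inv) := by
        have h' : M ∣ -(a' * inv - 1) := dvd_neg.mpr hinv
        rwa [neg_sub] at h'
      exact dvd_add (dvd_add (h1.mul_left p) (hM1.mul_left inv)) hrb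
    · intro hM2
      have he : a' * p - b' = a' * (p - r) + a' * (r - b' * inv) + b' * (a' * inv - 1) := by ring
      rw [he]
      have h1 : M ∣ (r - b' * inv) := by
        have h' : M ∣ -(b' * inv - r) := dvd_neg.mpr hrb
        rwa [neg_sub] at h'
      exact dvd_add (dvd_add (hM2.mul_left a') (h1.mul_left a')) (hinv.mul_left b')

-- the modulus returned by pvCong
lemma pv_cong_M (a b n r M : Int) (h : pvCong a b n = some (r, M)) :
    M = PySem.Int.floordiv |n| ((Int.gcd a |n| : Nat) : Int) := by
  unfold pvCong at h
  by_cases hb : PySem.Int.mod b ((Int.gcd a |n| : Nat) : Int) ≠ 0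
  · rw [if_pos hb] at h; simp at h
  · rw [if_neg hb] at h
    simp only [Option.some.injEq, Prod.mk.injEq] at h
    exact h.2.symm

-- merge characterization: none ⇒ the two classes do not intersect
lemma pv_merge_none (r1 M1 r2 M2 : Int) (h1 : 0 < M1) (h2 : 0 < M2)
    (h : pvMerge (some (r1, M1)) (some (r2, M2)) = none) :
    ∀ p : Int, ¬ (M1 ∣ (p - r1) ∧ M2 ∣ (p - r2)) := by
  rintro p ⟨hp1, hp2⟩
  cases hc : pvCong M1 (r2 - r1) M2 with
  | none =>
    obtain ⟨q, hq⟩ := hp1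
    apply pv_cong_none M1 (r2 - r1) M2 (by omega) hc q
    obtain ⟨s, hs⟩ := hp2
    exact ⟨s, by linarith [hq, hs]⟩
  | some kM =>
    simp only [pvMerge, hc] at h
    obtain ⟨k', M''⟩ := kM
    simp at h

-- merge characterization: some (R, L) ⇒ the intersection is exactly {p : p ≡ R (mod L)}
lemma pv_merge_some (r1 M1 r2 M2 R L : Int) (h1 : 0 < M1) (h2 : 0 < M2)
    (h : pvMerge (some (r1, M1)) (some (r2, M2)) = some (R, L)) :
    (0 < L ∧ 0 ≤ R ∧ R < L) ∧
      ∀ p : Int, ((M1 ∣ (p - r1) ∧ M2 ∣ (p - r2)) ↔ L ∣ (p - R)) := by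
  cases hc : pvCong M1 (r2 - r1) M2 with
  | none =>
    simp only [pvMerge, hc] at h
    exact absurd h.symm (Option.some_ne_none _)
  | some kM =>
    obtain ⟨k, M'⟩ := kM
    simp only [pvMerge, hc, Option.some.injEq, Prod.mk.injEq] at h
    obtain ⟨hR, hL⟩ := h
    rw [hL] at hR
    obtain ⟨⟨hM'pos, _, _⟩, hchar⟩ := pv_cong_some M1 (r2 - r1) M2 k M' (by omega) hc
    have hM2abs : |M2| = M2 := abs_of_pos h2
    have hMM' : M' = PySem.Int.floordiv M2 ((Int.gcd M1 M2 : Nat) : Int) := by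
      have := pv_cong_M M1 (r2 - r1) M2 k M' hc
      rwa [hM2abs] at this
    have hLM : L = M1 * M' := by rw [← hL, hMM']
    have hLpos : 0 < L := by rw [hLM]; positivity
    have hgpos : 0 < ((Int.gcd M1 M2 : Nat) : Int) := pv_gcd_cast_pos M1 M2 (by omega)
    have hgM1 : ((Int.gcd M1 M2 : Nat) : Int) ∣ M1 := Int.gcd_dvd_left M1 M2
    have hgM2 : ((Int.gcd M1 M2 : Nat) : Int) ∣ M2 := Int.gcd_dvd_right M1 M2
    have hM2L : M2 ∣ L := by
      obtain ⟨c, hcdef⟩ := hgM1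
      have hgM' : ((Int.gcd M1 M2 : Nat) : Int) * M' = M2 := by
        rw [hMM']
        exact pv_floordiv_exact _ _ hgpos hgM2
      exact ⟨c, by rw [hLM, hcdef]; linear_combination c * hgM'⟩
    have hM1L : M1 ∣ L := ⟨M', hLM⟩
    have hRc : L ∣ (r1 + M1 * k - R) := by rw [← hR]; exact pv_mod_dvd _ L
    have hkk : M2 ∣ (M1 * k - (r2 - r1)) := (hchar k).mpr ⟨0, by ring⟩
    refine ⟨⟨hLpos, by rw [← hR]; exact PySem.Int.mod_nonneg _ hLpos,
              by rw [← hR]; exact PySem.Int.mod_lt _ hLpos⟩, fun p => ?_⟩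
    constructor
    · rintro ⟨hp1, hp2⟩
      obtain ⟨q, hq⟩ := hp1
      have hq2 : M2 ∣ (M1 * q - (r2 - r1)) := by
        obtain ⟨s, hs⟩ := hp2
        exact ⟨s, by linarith⟩
      obtain ⟨s, hsdef⟩ := (hchar q).mp hq2
      have he : p - R = M1 * M' * s + (r1 + M1 * k - R) := by
        linear_combination hq + M1 * hsdef
      rw [hLM] at hRc ⊢
      rw [he]
      exact dvd_add ⟨s, rfl⟩ hRc
    · intro hpR
      have hp0 : L ∣ (p - (r1 + M1 * k)) := by
        have he : p - (r1 + M1 * k) = (p - R) - (r1 + M1 * k - R) := by ring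
        rw [he]
        exact dvd_sub hpR hRc
      constructor
      · have h3 : M1 ∣ (p - (r1 + M1 * k)) := hM1L.trans hp0
        have he : p - r1 = (p - (r1 + M1 * k)) + M1 * k := by ring
        rw [he]
        exact dvd_add h3 (dvd_mul_right M1 k)
      · have h4 : M2 ∣ (p - (r1 + M1 * k)) := hM2L.trans hp0
        have he : p - r2 = (p - (r1 + M1 * k)) + (M1 * k - (r2 - r1)) := by ring
        rw [he]
        exact dvd_add h4 hkk

-- smallest admissible power vs the order bound
lemma pv_interval (r L N : Int) (hL : 0 < L) (h0 : 0 ≤ r) (hr : r < L) :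
    ((if 0 < r then r else L) < N) ↔ ∃ p : Int, 1 ≤ p ∧ p < N ∧ L ∣ (p - r) := by
  constructor
  · intro h
    refine ⟨if 0 < r then r else L, by split_ifs <;> omega, h, ?_⟩
    split_ifs with hp
    · exact ⟨0, by ring⟩
    · exact ⟨1, by omega⟩
  · rintro ⟨p, hp1, hpN, hd⟩
    split_ifs with hp
    · have hrp : r ≤ p := by
        by_contra hlt
        have h0' := Int.eq_zero_of_abs_lt_dvd hd (by rw [abs_lt]; omega)
        omega
      omega
    · have hr0 : r = 0 := by omega
      subst hr0
      have hLp : L ≤ p := Int.le_of_dvd (by omega) (by simpa using hd)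
      omega

-- main per-pair lemma: pvReaches decides A's power-scan existential
lemma pv_reaches_eq (x t : Int × Int) (l m N : Int) (hl : l ≠ 0) (hm : m ≠ 0) :
    pvReaches x t l m N =
      (PySem.List.pyRange 1 N 1).any (fun p =>
        PySem.Int.mod (x.1 * p) l == t.1 && PySem.Int.mod (x.2 * p) m == t.2) := by
  rw [Bool.eq_iff_iff]
  unfold pvReaches
  by_cases hcan : PySem.Int.mod t.1 l ≠ t.1 ∨ PySem.Int.mod t.2 m ≠ t.2
  · rw [if_pos hcan]
    simp only [Bool.false_eq_true, false_iff]
    intro hany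
    obtain ⟨p, hp, hcond⟩ := List.any_eq_true.mp hany
    simp only [Bool.and_eq_true, beq_iff_eq] at hcond
    rcases hcan with hc | hc
    · exact hc ((pv_mod_char _ _ _ hl).mp hcond.1).1
    · exact hc ((pv_mod_char _ _ _ hm).mp hcond.2).1
  · rw [if_neg hcan]
    push_neg at hcan
    obtain ⟨hcl, hcm⟩ := hcan
    have hiff : ∀ p : Int,
        ((PySem.Int.mod (x.1 * p) l == t.1 && PySem.Int.mod (x.2 * p) m == t.2) = true)
          ↔ (l ∣ (x.1 * p - t.1) ∧ m ∣ (x.2 * p - t.2)) := by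
      intro p
      simp only [Bool.and_eq_true, beq_iff_eq, pv_mod_char _ _ _ hl, pv_mod_char _ _ _ hm,
        hcl, hcm, true_and]
    have hany_iff : ((PySem.List.pyRange 1 N 1).any (fun p =>
        PySem.Int.mod (x.1 * p) l == t.1 && PySem.Int.mod (x.2 * p) m == t.2) = true)
          ↔ ∃ p : Int, 1 ≤ p ∧ p < N ∧ l ∣ (x.1 * p - t.1) ∧ m ∣ (x.2 * p - t.2) := by
      rw [List.any_eq_true]
      constructor
      · rintro ⟨p, hp, hc⟩
        have hpm := (PySem.List.mem_pyRange_one).mp hp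
        exact ⟨p, hpm.1, hpm.2, (hiff p).mp hc⟩
      · rintro ⟨p, hp1, hp2, hc⟩
        exact ⟨p, (PySem.List.mem_pyRange_one).mpr ⟨hp1, hp2⟩, (hiff p).mpr hc⟩
    rw [hany_iff]
    cases hc1 : pvCong x.1 t.1 l with
    | none =>
      have hmg : pvMerge none (pvCong x.2 t.2 m) = none := by
        cases pvCong x.2 t.2 m <;> rfl
      rw [hmg]
      simp only [Bool.false_eq_true, false_iff]
      rintro ⟨p, _, _, hd1, _⟩
      exact pv_cong_none x.1 t.1 l hl hc1 p hd1
    | some c1 =>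
      obtain ⟨r1, M1⟩ := c1
      cases hc2 : pvCong x.2 t.2 m with
      | none =>
        have hmg : pvMerge (some (r1, M1)) none = none := by
          rfl
        rw [hmg]
        simp only [Bool.false_eq_true, false_iff]
        rintro ⟨p, _, _, _, hd2⟩
        exact pv_cong_none x.2 t.2 m hm hc2 p hd2
      | some c2 =>
        obtain ⟨r2, M2⟩ := c2
        obtain ⟨⟨hM1p, _, _⟩, hchar1⟩ := pv_cong_some x.1 t.1 l r1 M1 hl hc1
        obtain ⟨⟨hM2p, _, _⟩, hchar2⟩ := pv_cong_some x.2 t.2 m r2 M2 hm hc2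
        cases hmg : pvMerge (some (r1, M1)) (some (r2, M2)) with
        | none =>
          simp only [Bool.false_eq_true, false_iff]
          rintro ⟨p, _, _, hd1, hd2⟩
          exact pv_merge_none r1 M1 r2 M2 hM1p hM2p hmg p
            ⟨(hchar1 p).mp hd1, (hchar2 p).mp hd2⟩
        | some RL =>
          obtain ⟨R, L⟩ := RL
          obtain ⟨⟨hLp, hR0, hRL⟩, hcharL⟩ := pv_merge_some r1 M1 r2 M2 R L hM1p hM2p hmg
          rw [decide_eq_true_iff, pv_interval R L N hLp hR0 hRL]
          constructor
          · rintro ⟨p, hp1, hpN, hd⟩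
            obtain ⟨hd1, hd2⟩ := (hcharL p).mpr hd
            exact ⟨p, hp1, hpN, (hchar1 p).mpr hd1, (hchar2 p).mpr hd2⟩
          · rintro ⟨p, hp1, hpN, hd1, hd2⟩
            exact ⟨p, hp1, hpN, (hcharL p).mp ⟨(hchar1 p).mp hd1, (hchar2 p).mp hd2⟩⟩

-- ceiling division is plain floor division when the divisor divides exactly
lemma pv_ceil_exact (a g : Int) (hg : 0 < g) (h : g ∣ a) :
    pvCeilDiv a g = PySem.Int.floordiv a g := by
  obtain ⟨q, rfl⟩ := h
  unfold pvCeilDiv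
  rw [PySem.Int.floordiv_eq_ediv_of_pos hg, PySem.Int.floordiv_eq_ediv_of_pos hg]
  rw [show -(g * q) = g * (-q) by ring, Int.mul_ediv_cancel_left _ (ne_of_gt hg),
    Int.mul_ediv_cancel_left _ (ne_of_gt hg)]
  ring

lemma pv_order_eq (v : Int × Int) (l m : Int) (hl : l ≠ 0) (hm : m ≠ 0) :
    pvOrderB v l m = find_min_order v l m := by
  unfold pvOrderB find_min_order
  by_cases h1 : v.1 = 0
  · rw [if_pos h1, if_pos h1,
      pv_ceil_exact m _ (pv_gcd_cast_pos v.2 m hm) (Int.gcd_dvd_right v.2 m)]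
  · rw [if_neg h1, if_neg h1]
    have hx := pv_ceil_exact l _ (pv_gcd_cast_pos v.1 l hl) (Int.gcd_dvd_right v.1 l)
    split_ifs <;> rw [hx]

-- ===== VERDICT (by name: the statement is the Claim_ definition above) =====
theorem custom_contains_spec : Claim_equal_custom_contains := by
  intro generators value l m _ hpre
  unfold Spec_custom_contains custom_contains custom_contains_alt
  by_cases hnil : generators = []
  · subst hnil; simp
  · have h0 : ¬ generators.length = 0 := by simpa using hnil
    have hE : generators.isEmpty = false := by simpa using hnil
    simp only [h0, hE, Bool.false_eq_true, if_false]
    by_cases hv : value = (0, 0)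
    · simp [hv]
    · simp only [hv, if_false]
      obtain ⟨hl, hm⟩ : l ≠ 0 ∧ m ≠ 0 := by
        rcases hpre with h | h | h
        · exact absurd h hnil
        · exact absurd h hv
        · exact h
      show generators.any (fun g =>
          (PySem.List.pyRange 1 (find_min_order value l m) 1).any (fun p =>
            PySem.Int.mod (value.1 * p) l == g.1 && PySem.Int.mod (value.2 * p) m == g.2)
          ||
          (PySem.List.pyRange 1 (find_min_order g l m) 1).any (fun p =>
            PySem.Int.mod (g.1 * p) l == value.1 && PySem.Int.mod (g.2 * p) m == value.2))
        = generators.any (fun g =>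
          pvReaches value g l m (pvOrderB value l m) || pvReaches g value l m (pvOrderB g l m))
      refine congrArg generators.any (funext fun g => ?_)
      rw [pv_reaches_eq value g l m (pvOrderB value l m) hl hm,
        pv_reaches_eq g value l m (pvOrderB g l m) hl hm,
        pv_order_eq value l m hl hm, pv_order_eq g l m hl hm]
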